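-- pv_equiv track=rewrite | github.com/rtehok/perso-python | leetcode/1402_reducing_dishes.py | maxSatisfactionV1
-- ===== SOURCE A (Python) =====
-- from typing import List
--
-- def maxSatisfactionV1(satisfaction: List[int]) -> int:
--     res = 0
--     satisfaction.sort()
--
--     if satisfaction[-1] < 0:
--         return res
--
--     n = len(satisfaction)
--
--     for i in range(n):
--         tmp = 0
--         for j in range(i, n):
--             tmp += (j - i + 1) * satisfaction[j]
--             res = max(res, tmp)
--
--     return res
-- ===== SOURCE B (Python) =====
-- from typing import List
--
-- def maxSatisfactionV1(satisfaction: List[int]) -> int: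
--     # Sort ascending (in place, like A), then one right-to-left pass:
--     # suf = suffix sum, cur = weighted value of the current suffix, best = max so far.
--     satisfaction.sort()
--     suf = cur = best = 0
--     for x in reversed(satisfaction):
--         suf += x
--         cur += suf
--         if cur > best:
--             best = cur
--     return best
-- ===== Notes on version B (the rewrite author's own statement) =====
-- stated objective: faster
-- what changed: Replaces A's double loop over all (start,end) pairs with a single right-to-left pass over the sorted list that maintains the suffix sum and the running weighted total, keeping the maximum seen.
-- crash fix: On the empty list A raises IndexError (satisfaction[-1]); B returns 0 (no dish prepared). — e.g. on maxSatisfactionV1([]): A raises IndexError, B returns 0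
import Mathlib
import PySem

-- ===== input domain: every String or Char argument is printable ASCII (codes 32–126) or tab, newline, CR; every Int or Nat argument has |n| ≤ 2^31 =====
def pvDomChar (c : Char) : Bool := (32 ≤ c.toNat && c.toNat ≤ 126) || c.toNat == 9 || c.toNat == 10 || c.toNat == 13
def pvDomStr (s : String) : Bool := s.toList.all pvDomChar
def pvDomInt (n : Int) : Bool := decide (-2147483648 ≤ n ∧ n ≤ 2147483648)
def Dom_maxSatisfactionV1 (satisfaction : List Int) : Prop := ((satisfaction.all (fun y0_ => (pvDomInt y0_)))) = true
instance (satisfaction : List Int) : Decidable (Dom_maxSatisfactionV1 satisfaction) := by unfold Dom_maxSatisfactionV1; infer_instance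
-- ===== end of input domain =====

-- B replaces A's O(n^2) double loop with one right-to-left pass after sorting
-- (suffix sum + running weighted total); like A, B sorts the argument list in
-- place (same side effect); the equivalence proved is about the return value.


-- ===== PORT A =====
-- literal transliteration of A: sort; return 0 if the largest element is < 0
-- (satisfaction[-1]; IndexError on [] is excluded by Pre_, .getD 0 is the port's
-- total-function stand-in there); else the double loop over start i and end j.
def maxSatisfactionV1 (satisfaction : List Int) : Int :=
  let res : Int := 0
  let l := PySem.List.sorted satisfaction (fun x => x) false
  if (PySem.List.pyGet? l (-1)).getD 0 < 0 then res
  else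
    let n : Int := (l.length : Int)
    (PySem.List.pyRange 0 n 1).foldl (fun res i =>
      ((PySem.List.pyRange i n 1).foldl (fun (st : Int × Int) j =>
        ((st.1 + (j - i + 1) * PySem.List.pyGetD l j 0),
         max st.2 (st.1 + (j - i + 1) * PySem.List.pyGetD l j 0))) (0, res)).2) res

-- ===== PORT B =====
-- literal transliteration of B: sort, then one fold over the reversed list with
-- state (suf, cur, best).
def maxSatisfactionV1_alt (satisfaction : List Int) : Int :=
  let l := PySem.List.sorted satisfaction (fun x => x) false
  (l.reverse.foldl (fun (st : Int × Int × Int) x =>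
      ((st.1 + x), (st.2.1 + (st.1 + x)),
       if st.2.1 + (st.1 + x) > st.2.2 then st.2.1 + (st.1 + x) else st.2.2)) (0, 0, 0)).2.2

-- ===== PRECONDITION & SPEC =====
-- Pre_ excludes only the empty list, on which A raises IndexError (satisfaction[-1]).
def Pre_maxSatisfactionV1 (satisfaction : List Int) : Prop := satisfaction ≠ []
instance (satisfaction : List Int) : Decidable (Pre_maxSatisfactionV1 satisfaction) := by unfold Pre_maxSatisfactionV1; infer_instance
def pvWitness_maxSatisfactionV1 : List Int := [1, -2, 3]

-- On the empty list A raises IndexError (satisfaction[-1]); B returns 0 (no dish prepared).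
def Raises_maxSatisfactionV1 (satisfaction : List Int) : Prop := satisfaction = []
instance (satisfaction : List Int) : Decidable (Raises_maxSatisfactionV1 satisfaction) := by unfold Raises_maxSatisfactionV1; infer_instance
def pvRaiseWitness_maxSatisfactionV1 : List Int := []
def pvRaiseWitnessOut_maxSatisfactionV1 : Int := 0

def Spec_maxSatisfactionV1 (satisfaction : List Int) (out : Int) : Prop := out = maxSatisfactionV1_alt satisfaction
instance (satisfaction : List Int) (out : Int) : Decidable (Spec_maxSatisfactionV1 satisfaction out) := by unfold Spec_maxSatisfactionV1; infer_instance

-- ===== CLAIM (what is proved, stated in full; the proofs are below) =====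
def Claim_equal_maxSatisfactionV1 : Prop := ∀ (satisfaction : List Int), Dom_maxSatisfactionV1 satisfaction → Pre_maxSatisfactionV1 satisfaction → Spec_maxSatisfactionV1 satisfaction (maxSatisfactionV1 satisfaction)
def Claim_raises_maxSatisfactionV1 : Prop := (∀ (satisfaction : List Int), Dom_maxSatisfactionV1 satisfaction → Raises_maxSatisfactionV1 satisfaction → ¬ Pre_maxSatisfactionV1 satisfaction) ∧ (Dom_maxSatisfactionV1 (pvRaiseWitness_maxSatisfactionV1) ∧ Raises_maxSatisfactionV1 (pvRaiseWitness_maxSatisfactionV1) ∧ maxSatisfactionV1_alt (pvRaiseWitness_maxSatisfactionV1) = pvRaiseWitnessOut_maxSatisfactionV1)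

-- ===== LEMMAS AND PROOFS =====

-- wgt u = Σ (k+1)·u[k] : the value of preparing exactly the dishes of u, in order
def wgt : List Int → Int
  | [] => 0
  | x :: t => x + t.sum + wgt t

-- bw l = max(0, max over nonempty suffixes u of l of wgt u): what B computes
def bw : List Int → Int
  | [] => 0
  | x :: t => max (bw t) (wgt (x :: t))

-- A's inner loop, over the suffix it scans, with running weight w
def innF (w : Int) (st : Int × Int) : List Int → Int × Int
  | [] => st
  | x :: t => innF (w + 1) (st.1 + w * x, max st.2 (st.1 + w * x)) t

-- A's outer loop, over suffixes
def outF (res : Int) : List Int → Int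
  | [] => res
  | x :: t => outF ((innF 1 (0, res) (x :: t)).2) t

-- wgt with weights starting at w
def wgtW (w : Int) : List Int → Int
  | [] => 0
  | x :: t => w * x + wgtW (w + 1) t

theorem wgtW_one (u : List Int) : wgtW 1 u = wgt u := by
  suffices h : ∀ w, wgtW w u = wgt u + (w - 1) * u.sum by simpa using h 1
  induction u with
  | nil => intro w; simp [wgtW, wgt]
  | cons x t ih => intro w; simp [wgtW, wgt, ih (w + 1)]; ring

theorem wgtW_nonneg (w : Int) (u : List Int) (hw : 0 ≤ w) (h : ∀ y ∈ u, 0 ≤ y) :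
    0 ≤ wgtW w u := by
  induction u generalizing w with
  | nil => simp [wgtW]
  | cons x t ih =>
    have hx : 0 ≤ x := h x (by simp)
    have ht := ih (w + 1) (by omega) (fun y hy => h y (by simp [hy]))
    have hwx : 0 ≤ w * x := mul_nonneg hw hx
    simp only [wgtW]; omega

theorem innF_res_le (w : Int) (st : Int × Int) (u : List Int) :
    st.2 ≤ (innF w st u).2 := by
  induction u generalizing w st with
  | nil => simp [innF]
  | cons x t ih =>
    simp only [innF]
    exact le_trans (le_max_left _ _) (ih (w + 1) _)

theorem innF_total_le (w : Int) (st : Int × Int) (u : List Int) (hu : u ≠ []) :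
    st.1 + wgtW w u ≤ (innF w st u).2 := by
  induction u generalizing w st with
  | nil => simp at hu
  | cons x t ih =>
    rcases t with _ | ⟨y, t'⟩
    · simp only [innF, wgtW]; omega
    · have h := ih (w + 1) (st.1 + w * x, max st.2 (st.1 + w * x)) (by simp)
      simp only [innF, wgtW] at h ⊢
      omega

theorem innF_le (w : Int) (st : Int × Int) (u : List Int)
    (hw : 1 ≤ w) (hs : u.Pairwise (· ≤ ·)) :
    (innF w st u).2 ≤ max st.2 (max st.1 (st.1 + wgtW w u)) := by
  induction u generalizing w st with
  | nil => simp [innF, wgtW]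
  | cons x t ih =>
    rw [List.pairwise_cons] at hs
    have key : st.1 + w * x ≤ max st.1 (st.1 + wgtW w (x :: t)) := by
      by_cases hx : 0 ≤ x
      · have ht : 0 ≤ wgtW (w + 1) t :=
          wgtW_nonneg _ _ (by omega) (fun y hy => le_trans hx (hs.1 y hy))
        have hwx : 0 ≤ w * x := mul_nonneg (by omega) hx
        simp only [wgtW]; omega
      · have hwx : w * x ≤ x := by nlinarith
        simp only [wgtW]; omega
    have h := ih (w + 1) (st.1 + w * x, max st.2 (st.1 + w * x)) (by omega) hs.2
    simp only [innF, wgtW] at h key ⊢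
    omega

theorem outF_res_le (res : Int) (l : List Int) : res ≤ outF res l := by
  induction l generalizing res with
  | nil => simp [outF]
  | cons x t ih =>
    exact le_trans (innF_res_le 1 (0, res) (x :: t)) (ih _)

theorem bw_le_outF (res : Int) (l : List Int) (hres : 0 ≤ res) : bw l ≤ outF res l := by
  induction l generalizing res with
  | nil => simpa [outF, bw] using hres
  | cons x t ih =>
    have h1 : wgt (x :: t) ≤ (innF 1 (0, res) (x :: t)).2 := by
      have h := innF_total_le 1 (0, res) (x :: t) (by simp)
      simpa [wgtW_one] using h
    have h2 := outF_res_le ((innF 1 (0, res) (x :: t)).2) t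
    have hres' : 0 ≤ (innF 1 (0, res) (x :: t)).2 :=
      le_trans hres (innF_res_le 1 (0, res) (x :: t))
    simp only [bw, outF]
    exact max_le (ih _ hres') (le_trans h1 h2)

theorem outF_le (res : Int) (l : List Int) (hs : l.Pairwise (· ≤ ·)) :
    outF res l ≤ max res (max 0 (bw l)) := by
  induction l generalizing res with
  | nil => simp [outF]
  | cons x t ih =>
    rw [List.pairwise_cons] at hs
    have h1 : (innF 1 (0, res) (x :: t)).2 ≤ max res (max 0 (wgt (x :: t))) := by
      have h := innF_le 1 (0, res) (x :: t) (by omega) (List.pairwise_cons.mpr hs)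
      simpa [wgtW_one] using h
    have h2 := ih ((innF 1 (0, res) (x :: t)).2) hs.2
    simp only [outF, bw] at *
    omega

theorem bw_nonneg (l : List Int) : 0 ≤ bw l := by
  induction l with
  | nil => simp [bw]
  | cons x t ih => simp only [bw]; omega

theorem outF_zero_eq_bw (l : List Int) (hs : l.Pairwise (· ≤ ·)) : outF 0 l = bw l := by
  have h1 := bw_le_outF 0 l (le_refl 0)
  have h2 := outF_le 0 l hs
  have h3 := bw_nonneg l
  omega

theorem sum_nonpos (l : List Int) (h : ∀ y ∈ l, y < 0) : l.sum ≤ 0 := by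
  induction l with
  | nil => simp
  | cons x t ih =>
    have h1 := h x (by simp)
    have h2 := ih (fun y hy => h y (by simp [hy]))
    simp only [List.sum_cons]; omega

theorem wgt_nonpos (l : List Int) (h : ∀ y ∈ l, y < 0) : wgt l ≤ 0 := by
  induction l with
  | nil => simp [wgt]
  | cons x t ih =>
    have hx := h x (by simp)
    have hs := sum_nonpos t (fun y hy => h y (by simp [hy]))
    have ht := ih (fun y hy => h y (by simp [hy]))
    simp only [wgt]; omega

theorem bw_all_neg (l : List Int) (h : ∀ y ∈ l, y < 0) : bw l = 0 := by
  induction l with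
  | nil => simp [bw]
  | cons x t ih =>
    have h1 : wgt (x :: t) ≤ 0 := wgt_nonpos _ h
    have h2 := ih (fun y hy => h y (by simp [hy]))
    simp only [bw, h2]; omega

theorem mem_le_getLast (l : List Int) (h : l ≠ []) (hs : l.Pairwise (· ≤ ·))
    (x : Int) (hx : x ∈ l) : x ≤ l.getLast h := by
  induction l with
  | nil => simp at hx
  | cons a t ih =>
    rw [List.pairwise_cons] at hs
    rcases t with _ | ⟨b, t'⟩
    · simp at hx; simp [List.getLast, hx]
    · rw [List.getLast_cons (by simp)]
      rcases List.mem_cons.mp hx with rfl | hx'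
      · exact le_trans (hs.1 _ (List.getLast_mem _)) (le_refl _)
      · exact ih (by simp) hs.2 hx'

-- ===== bridge: A's pyRange folds compute outF over the sorted list =====

theorem inner_bridge (l : List Int) (i : Int) (m : Nat) :
    ∀ (k : Nat) (st : Int × Int), l.length = k + m →
    (PySem.List.pyRange (k : Int) (l.length : Int) 1).foldl (fun (st : Int × Int) j =>
        ((st.1 + (j - i + 1) * PySem.List.pyGetD l j 0),
         max st.2 (st.1 + (j - i + 1) * PySem.List.pyGetD l j 0))) st
      = innF ((k : Int) - i + 1) st (l.drop k) := by
  induction m with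
  | zero =>
    intro k st hk
    rw [PySem.List.pyRange_one_eq_nil (by omega), List.drop_eq_nil_of_le (by omega)]
    simp [innF]
  | succ m ih =>
    intro k st hk
    have hklt : k < l.length := by omega
    have hget : PySem.List.pyGetD l (k : Int) 0 = l[k] := by
      rw [PySem.List.pyGetD_natCast, List.getD_eq_getElem l 0 hklt]
    rw [PySem.List.pyRange_one_cons (by exact_mod_cast hklt),
        List.drop_eq_getElem_cons hklt]
    simp only [List.foldl_cons, innF, hget]
    have hc : ((k : Int)) - i + 1 + 1 = ((k + 1 : Nat) : Int) - i + 1 := by push_cast; ring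
    have hcast : ((k : Int) + 1) = ((k + 1 : Nat) : Int) := by push_cast; ring
    rw [hc, hcast, ih (k + 1) _ (by omega)]

theorem outer_bridge (l : List Int) (m : Nat) :
    ∀ (k : Nat) (res : Int), l.length = k + m →
    (PySem.List.pyRange (k : Int) (l.length : Int) 1).foldl (fun res i =>
      ((PySem.List.pyRange i (l.length : Int) 1).foldl (fun (st : Int × Int) j =>
        ((st.1 + (j - i + 1) * PySem.List.pyGetD l j 0),
         max st.2 (st.1 + (j - i + 1) * PySem.List.pyGetD l j 0))) (0, res)).2) res
      = outF res (l.drop k) := by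
  induction m with
  | zero =>
    intro k res hk
    rw [PySem.List.pyRange_one_eq_nil (by omega), List.drop_eq_nil_of_le (by omega)]
    simp [outF]
  | succ m ih =>
    intro k res hk
    have hklt : k < l.length := by omega
    rw [PySem.List.pyRange_one_cons (by exact_mod_cast hklt)]
    simp only [List.foldl_cons]
    have h1 : ((k : Int)) - (k : Int) + 1 = 1 := by ring
    rw [inner_bridge l (k : Int) (m + 1) k (0, res) hk, h1]
    rw [List.drop_eq_getElem_cons hklt]
    simp only [outF]
    have hcast : ((k : Int) + 1) = ((k + 1 : Nat) : Int) := by push_cast; ring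
    rw [hcast, ih (k + 1) _ (by omega)]

-- ===== B's fold computes (sum, wgt, bw) =====

theorem B_foldr (l : List Int) :
    l.foldr (fun x (st : Int × Int × Int) =>
      ((st.1 + x), (st.2.1 + (st.1 + x)),
       if st.2.1 + (st.1 + x) > st.2.2 then st.2.1 + (st.1 + x) else st.2.2)) (0, 0, 0)
      = (l.sum, wgt l, bw l) := by
  induction l with
  | nil => simp [wgt, bw]
  | cons x t ih =>
    simp only [List.foldr_cons, ih, List.sum_cons, wgt, bw]
    refine Prod.ext (by ring) (Prod.ext (by simp; ring) ?_)
    simp only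
    have : wgt t + (t.sum + x) = x + t.sum + wgt t := by ring
    rw [this]
    rcases le_or_gt (x + t.sum + wgt t) (bw t) with h | h
    · rw [if_neg (by omega), max_eq_left h]
    · rw [if_pos (by omega), max_eq_right (by omega)]

theorem alt_eq_bw (satisfaction : List Int) :
    maxSatisfactionV1_alt satisfaction
      = bw (PySem.List.sorted satisfaction (fun x => x) false) := by
  simp only [maxSatisfactionV1_alt]
  rw [List.foldl_reverse, B_foldr]

-- ===== VERDICT (by name: the statement is the Claim_ definition above) =====
theorem maxSatisfactionV1_spec : Claim_equal_maxSatisfactionV1 := by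
  unfold Claim_equal_maxSatisfactionV1
  intro satisfaction _ _
  unfold Spec_maxSatisfactionV1
  rw [alt_eq_bw]
  simp only [maxSatisfactionV1]
  set l := PySem.List.sorted satisfaction (fun x => x) false with hl
  have hs : l.Pairwise (· ≤ ·) := PySem.List.sorted_pairwise satisfaction (fun x => x)
  by_cases hc : (PySem.List.pyGet? l (-1)).getD 0 < 0
  · rw [if_pos hc]
    have hne : l ≠ [] := by
      intro h
      rw [h] at hc
      simp [PySem.List.pyGet?_neg_one] at hc
    have hlast : (PySem.List.pyGet? l (-1)).getD 0 = l.getLast hne := by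
      rw [PySem.List.pyGet?_neg_one, List.getLast?_eq_some_getLast hne]
      rfl
    have hallneg : ∀ y ∈ l, y < 0 := fun y hy =>
      lt_of_le_of_lt (mem_le_getLast l hne hs y hy) (by rw [← hlast]; exact hc)
    rw [bw_all_neg l hallneg]
  · rw [if_neg hc]
    have hb := outer_bridge l l.length 0 0 (by omega)
    simp only [Nat.cast_zero, List.drop_zero] at hb
    rw [hb, outF_zero_eq_bw l hs]

@[simp]
theorem maxSatisfactionV1_raises : Claim_raises_maxSatisfactionV1 := by
  unfold Claim_raises_maxSatisfactionV1
  exact ⟨fun s _ hr hp => hp hr, by decide⟩
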